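-- pv_equiv track=rewrite | github.com/aarjac/tic_tac_toe_clean | tic_tac_toe_clean.py | mark_board
-- ===== SOURCE A (Python) =====
-- def mark_board(player_move, player_mark, game_board):
--
--     for row_index,row in enumerate(game_board):
--
--         for column_index in range(len(row)):
--
--             player_move-=1
--
--             if player_move==0:
--
--                 game_board[row_index][column_index]=player_mark
--
--             else:
--
--                 pass
--
--     return game_board
-- ===== SOURCE B (Python) =====
-- def mark_board(player_move, player_mark, game_board):
--     if player_move >= 1:
--         remaining = player_move
--         for row_index, row in enumerate(game_board):
--             if remaining <= len(row):
--                 game_board[row_index][remaining - 1] = player_mark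
--                 break
--             remaining -= len(row)
--     return game_board
-- ===== Notes on version B (the rewrite author's own statement) =====
-- stated objective: simpler
-- what changed: B locates the target row by subtracting row lengths from the 1-based move and writes the single cell directly, instead of A's scan over every cell of the whole board with a decrementing counter; B stops at the target row.
import Mathlib
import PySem

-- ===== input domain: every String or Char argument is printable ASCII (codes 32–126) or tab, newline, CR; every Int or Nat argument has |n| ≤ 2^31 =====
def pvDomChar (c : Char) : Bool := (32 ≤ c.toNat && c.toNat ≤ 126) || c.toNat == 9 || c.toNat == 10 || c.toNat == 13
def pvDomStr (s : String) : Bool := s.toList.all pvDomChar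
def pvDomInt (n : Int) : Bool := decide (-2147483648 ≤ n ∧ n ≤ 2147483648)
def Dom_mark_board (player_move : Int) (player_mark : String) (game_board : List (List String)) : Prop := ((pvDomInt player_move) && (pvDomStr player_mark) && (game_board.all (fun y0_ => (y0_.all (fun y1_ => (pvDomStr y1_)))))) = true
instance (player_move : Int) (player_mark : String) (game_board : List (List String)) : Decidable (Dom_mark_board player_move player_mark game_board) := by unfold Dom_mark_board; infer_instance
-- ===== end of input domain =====

-- One-line summary: B finds the target row by subtracting row lengths from the 1-based move and
-- writes the single cell, instead of A's counter scan over every cell (objective: simpler).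
-- Both Pythons mutate game_board in place and return it; the equivalence proved is about the return value.

-- ===== PORT A =====

-- game_board[ri][ci] = mark (both indices in range whenever A executes the assignment)
def pvSetCell (mark : String) : List (List String) → Nat → Nat → List (List String)
  | [], _, _ => []
  | r :: rs, 0, ci => r.set ci mark :: rs
  | r :: rs, ri+1, ci => r :: pvSetCell mark rs ri ci

def mark_board (player_move : Int) (player_mark : String) (game_board : List (List String)) : List (List String) :=
  -- for row_index,row in enumerate(game_board): for column_index in range(len(row)): …
  -- row_index/column_index are enumerate/range values, always ≥ 0, so .toNat is exact here
  ((PySem.List.enumerate game_board).foldl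
    (fun st p =>
      (PySem.List.pyRange 0 p.2.length 1).foldl
        (fun st2 ci =>
          let pm' := st2.1 - 1
          if pm' = 0 then (pm', pvSetCell player_mark st2.2 p.1.toNat ci.toNat) else (pm', st2.2))
        st)
    (player_move, game_board)).2

-- ===== PORT B =====

-- walk the rows, subtracting lengths; remaining ≥ 1 at every call, so (remaining-1).toNat is exact
def pvMarkRows (mark : String) (remaining : Int) : List (List String) → List (List String)
  | [] => []
  | r :: rs =>
      if remaining ≤ (r.length : Int) then r.set (remaining - 1).toNat mark :: rs
      else r :: pvMarkRows mark (remaining - r.length) rs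

def mark_board_alt (player_move : Int) (player_mark : String) (game_board : List (List String)) : List (List String) :=
  if player_move ≥ 1 then pvMarkRows player_mark player_move game_board else game_board

-- ===== PRECONDITION & SPEC =====
def Spec_mark_board (player_move : Int) (player_mark : String) (game_board : List (List String)) (out : List (List String)) : Prop := out = mark_board_alt player_move player_mark game_board
instance (player_move : Int) (player_mark : String) (game_board : List (List String)) (out : List (List String)) : Decidable (Spec_mark_board player_move player_mark game_board out) := by unfold Spec_mark_board; infer_instance

-- ===== CLAIM (what is proved, stated in full; the proofs are below) =====
def Claim_equal_mark_board : Prop := ∀ (player_move : Int) (player_mark : String) (game_board : List (List String)), Dom_mark_board player_move player_mark game_board → Spec_mark_board player_move player_mark game_board (mark_board player_move player_mark game_board)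

-- ===== LEMMAS AND PROOFS =====

-- abstract description of A's result board: the row/column located by the 1-based flat position pm
def pvMarkAux (mark : String) (pm : Int) (b : List (List String)) (s : Nat) : List (List String) → List (List String)
  | [] => b
  | r :: rs =>
      if 1 ≤ pm ∧ pm ≤ (r.length : Int) then pvSetCell mark b s (pm - 1).toNat
      else pvMarkAux mark (pm - r.length) b (s+1) rs

-- A's inner loop over one row of length L
lemma pv_inner (mark : String) (ri : Nat) (L : Nat) (pm : Int) (b : List (List String)) :
    (PySem.List.pyRange 0 L 1).foldl
        (fun st2 ci =>
          let pm' := st2.1 - 1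
          if pm' = 0 then (pm', pvSetCell mark st2.2 ri ci.toNat) else (pm', st2.2))
        (pm, b)
      = (pm - L, if 1 ≤ pm ∧ pm ≤ (L : Int) then pvSetCell mark b ri (pm - 1).toNat else b) := by
  induction L with
  | zero =>
      rw [PySem.List.pyRange_one_eq_nil (by norm_num), List.foldl_nil,
          if_neg (show ¬ (1 ≤ pm ∧ pm ≤ ((0:Nat) : Int)) by push_cast; omega)]
      norm_num
  | succ n ih =>
      rw [show ((n+1 : Nat) : Int) = (n : Int) + 1 by push_cast; ring,
          PySem.List.pyRange_one_succ_right (by positivity)]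
      rw [List.foldl_append, ih]
      simp only [List.foldl_cons, List.foldl_nil]
      by_cases h : pm - (n : Int) - 1 = 0
      · have h1 : ¬ (1 ≤ pm ∧ pm ≤ (n : Int)) := by omega
        have h2 : (1 ≤ pm ∧ pm ≤ (n : Int) + 1) := by omega
        rw [if_neg h1, if_pos h, if_pos h2, Prod.mk.injEq]
        refine ⟨by omega, ?_⟩
        congr 1
        omega
      · by_cases h4 : 1 ≤ pm ∧ pm ≤ (n : Int)
        · rw [if_pos h4, if_neg h, if_pos (show (1 ≤ pm ∧ pm ≤ ((n:Nat)+1 : Int)) by omega),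
              Prod.mk.injEq]
          exact ⟨by omega, rfl⟩
        · rw [if_neg h4, if_neg h, if_neg (show ¬(1 ≤ pm ∧ pm ≤ ((n:Nat)+1 : Int)) by omega),
              Prod.mk.injEq]
          exact ⟨by omega, rfl⟩

-- once the counter is ≤ 0 it never hits 0 again: the board component is left unchanged
lemma pv_dead (mark : String) (rs : List (List String)) (s : Int) (pm : Int) (b : List (List String))
    (hpm : pm ≤ 0) :
    (PySem.List.enumerate rs s).foldl
        (fun st p =>
          (PySem.List.pyRange 0 p.2.length 1).foldl
            (fun st2 ci =>
              let pm' := st2.1 - 1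
              if pm' = 0 then (pm', pvSetCell mark st2.2 p.1.toNat ci.toNat) else (pm', st2.2))
            st)
        (pm, b)
      = (pm - ((rs.map List.length).sum : Int), b) := by
  induction rs generalizing s pm b with
  | nil => simp [PySem.List.enumerate_nil]
  | cons r rs ih =>
      rw [PySem.List.enumerate_cons, List.foldl_cons, pv_inner]
      have : ¬ (1 ≤ pm ∧ pm ≤ (r.length : Int)) := by omega
      rw [if_neg this, ih (s+1) _ b (by omega)]
      simp; push_cast; ring

-- A's outer loop computes pvMarkAux
lemma pv_outer (mark : String) (rs : List (List String)) (s : Nat) (pm : Int) (b : List (List String)) :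
    (PySem.List.enumerate rs (s : Int)).foldl
        (fun st p =>
          (PySem.List.pyRange 0 p.2.length 1).foldl
            (fun st2 ci =>
              let pm' := st2.1 - 1
              if pm' = 0 then (pm', pvSetCell mark st2.2 p.1.toNat ci.toNat) else (pm', st2.2))
            st)
        (pm, b)
      = (pm - ((rs.map List.length).sum : Int), pvMarkAux mark pm b s rs) := by
  induction rs generalizing s pm b with
  | nil => simp [PySem.List.enumerate_nil, pvMarkAux]
  | cons r rs ih =>
      rw [PySem.List.enumerate_cons, List.foldl_cons, pv_inner]
      simp only []
      by_cases h : 1 ≤ pm ∧ pm ≤ (r.length : Int)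
      · rw [if_pos h, pv_dead mark rs _ _ _ (by omega)]
        simp only [pvMarkAux, if_pos h, Int.toNat_natCast]
        rw [Prod.mk.injEq]
        refine ⟨?_, rfl⟩
        simp only [List.map_cons, List.sum_cons]
        push_cast
        ring
      · rw [if_neg h]
        have h2 := ih (s+1) (pm - r.length) b
        rw [show ((s:Int) + 1) = ((s+1 : Nat) : Int) by push_cast; ring, h2]
        simp only [pvMarkAux, if_neg h]
        rw [Prod.mk.injEq]
        refine ⟨?_, rfl⟩
        simp only [List.map_cons, List.sum_cons]
        push_cast
        ring

-- pvMarkAux never touches the board when the counter starts nonpositive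
lemma pv_aux_dead (mark : String) (rs : List (List String)) (pm : Int) (b : List (List String)) (s : Nat)
    (hpm : pm ≤ 0) : pvMarkAux mark pm b s rs = b := by
  induction rs generalizing pm s with
  | nil => rfl
  | cons r rs ih =>
      simp only [pvMarkAux]
      rw [if_neg (by omega)]
      exact ih _ _ (by omega)

lemma pvSetCell_append (mark : String) (pre : List (List String)) (r : List String)
    (rs : List (List String)) (c : Nat) :
    pvSetCell mark (pre ++ r :: rs) pre.length c = pre ++ (r.set c mark :: rs) := by
  induction pre with
  | nil => rfl
  | cons p pre ih => simpa [pvSetCell] using ih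

-- pvMarkAux on the suffix equals B's row walk, for a positive counter
lemma pv_aux_rows (mark : String) (rs : List (List String)) (pre : List (List String)) (pm : Int)
    (hpm : 1 ≤ pm) :
    pvMarkAux mark pm (pre ++ rs) pre.length rs = pre ++ pvMarkRows mark pm rs := by
  induction rs generalizing pre pm with
  | nil => simp [pvMarkAux, pvMarkRows]
  | cons r rs ih =>
      simp only [pvMarkAux, pvMarkRows]
      by_cases h : pm ≤ (r.length : Int)
      · rw [if_pos ⟨hpm, h⟩, if_pos h, pvSetCell_append]
      · rw [if_neg (by omega), if_neg h]
        have := ih (pre ++ [r]) (pm - r.length) (by omega)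
        simpa using this

-- ===== VERDICT (by name: the statement is the Claim_ definition above) =====
theorem mark_board_spec : Claim_equal_mark_board := by
  intro pm mark gb _
  show mark_board pm mark gb = mark_board_alt pm mark gb
  unfold mark_board mark_board_alt
  rw [show (PySem.List.enumerate gb) = PySem.List.enumerate gb ((0:Nat):Int) by norm_num]
  rw [pv_outer]
  by_cases h : pm ≥ 1
  · rw [if_pos h]
    have := pv_aux_rows mark gb [] pm h
    simpa using this
  · rw [if_neg h]
    exact pv_aux_dead mark gb pm gb 0 (by omega)
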